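-- pv_equiv track=rewrite | github.com/SiuyunYip/CS7NS1-Project3-Diver | router_final.py | get_interest_name
-- ===== SOURCE A (Python) =====
-- def get_interest_name(interest):
--     interest_arr = interest.split('/')
--     interest_name = ''
--     start = False
--     for i in range(1, len(interest_arr)):
--         if start:
--             interest_name = interest_name + interest_arr[i] + '/'
--         if interest_arr[i - 1] == 'area':
--             start = True
--     if interest_name != '':
--         return interest_name[:-1]
--     else:
--         return interest
-- ===== SOURCE B (Python) =====
-- def get_interest_name(interest):
--     arr = interest.split('/')
--     try:
--         i = arr.index('area')
--     except ValueError: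
--         return interest
--     tail = arr[i + 2:]
--     return '/'.join(tail) if tail else interest
-- ===== Notes on version B (the rewrite author's own statement) =====
-- stated objective: simpler
-- what changed: Replaces the stateful start-flag accumulation loop (build name+'/' pieces, then strip the trailing slash) with a direct find-then-slice-then-join: locate the first 'area' token with list.index, slice the tokens after the one following it, and join them with '/'.
import Mathlib
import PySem

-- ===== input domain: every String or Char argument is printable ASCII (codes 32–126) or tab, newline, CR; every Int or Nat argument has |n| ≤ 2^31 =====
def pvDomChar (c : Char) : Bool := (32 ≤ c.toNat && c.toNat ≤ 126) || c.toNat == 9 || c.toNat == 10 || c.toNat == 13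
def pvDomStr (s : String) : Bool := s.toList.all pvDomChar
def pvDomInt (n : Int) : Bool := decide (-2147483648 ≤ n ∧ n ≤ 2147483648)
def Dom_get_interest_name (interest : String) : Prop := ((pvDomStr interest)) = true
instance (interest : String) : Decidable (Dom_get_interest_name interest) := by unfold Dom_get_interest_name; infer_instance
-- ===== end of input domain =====

-- B replaces A's stateful start-flag accumulation loop with a find('area')-then-slice-then-join decomposition (objective: simpler).

-- ===== PORT A =====
-- interest.split('/') has a non-empty literal separator: PySem.Chars.splitOn is exact here.
def get_interest_name (interest : String) : String :=
  let interest_arr := PySem.Chars.splitOn interest.toList ['/']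
  let st := (PySem.List.pyRange 1 interest_arr.length).foldl
    (fun (st : List Char × Bool) i =>
      let name := if st.2 then st.1 ++ PySem.List.pyGetD interest_arr i [] ++ ['/'] else st.1
      let start := if PySem.List.pyGetD interest_arr (i - 1) [] = "area".toList then true else st.2
      (name, start)) ([], false)
  if st.1 ≠ [] then String.ofList (PySem.List.slice st.1 none (some (-1))) else interest

-- ===== PORT B =====
def get_interest_name_alt (interest : String) : String :=
  let arr := PySem.Chars.splitOn interest.toList ['/']
  match PySem.List.index? arr "area".toList with
  | none => interest
  | some i =>
    let tail := PySem.List.slice arr (some ((i : Int) + 2)) none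
    if tail = [] then interest else String.ofList (PySem.Chars.join ['/'] tail)

-- ===== PRECONDITION & SPEC =====
def Spec_get_interest_name (interest : String) (out : String) : Prop := out = get_interest_name_alt interest
instance (interest : String) (out : String) : Decidable (Spec_get_interest_name interest out) := by unfold Spec_get_interest_name; infer_instance

-- ===== CLAIM (what is proved, stated in full; the proofs are below) =====
def Claim_equal_get_interest_name : Prop := ∀ (interest : String), Dom_get_interest_name interest → Spec_get_interest_name interest (get_interest_name interest)

-- ===== LEMMAS AND PROOFS =====

-- A's loop, written structurally: process the tokens after the first, carrying the previous token.
def pvLoopA : List (List Char) → List Char → List Char × Bool → List Char × Bool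
  | [], _, st => st
  | x :: xs, prev, st =>
      let name := if st.2 then st.1 ++ x ++ ['/'] else st.1
      let start := if prev = "area".toList then true else st.2
      pvLoopA xs x (name, start)

-- the accumulated name: every token followed by '/'
def pvFlat (l : List (List Char)) : List Char := (l.map (· ++ ['/'])).flatten

theorem pvLoopA_true (xs : List (List Char)) : ∀ (prev name : List Char),
    (pvLoopA xs prev (name, true)).1 = name ++ pvFlat xs := by
  induction xs with
  | nil => intro prev name; simp [pvLoopA, pvFlat]
  | cons x xs ih =>
    intro prev name
    simp only [pvLoopA, if_true, ite_self]
    rw [ih x (name ++ x ++ ['/'])]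
    simp [pvFlat, List.append_assoc]

theorem pvLoopA_false (t : List (List Char)) : ∀ (prev : List Char),
    (pvLoopA t prev ([], false)).1 =
      match PySem.List.index? (prev :: t) "area".toList with
      | none => []
      | some i => pvFlat (t.drop (i + 1)) := by
  induction t with
  | nil =>
    intro prev
    by_cases h : prev = "area".toList
    · subst h
      rw [PySem.List.index?_cons_self]
      simp [pvLoopA, pvFlat]
    · rw [PySem.List.index?_cons_of_ne [] (by simpa using h)]
      simp [pvLoopA, PySem.List.index?]
  | cons x xs ih =>
    intro prev
    by_cases h : prev = "area".toList
    · subst h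
      rw [PySem.List.index?_cons_self]
      simp only [pvLoopA, Bool.false_eq_true, if_false, if_true]
      rw [pvLoopA_true]
      simp
    · rw [PySem.List.index?_cons_of_ne (x :: xs) (by simpa using h)]
      simp only [pvLoopA, Bool.false_eq_true, if_false, if_neg h]
      rw [ih x]
      cases hix : PySem.List.index? (x :: xs) "area".toList with
      | none => simp
      | some i => simp [List.drop_succ_cons]

-- A's indexed foldl over range(k+1, len(arr)) is pvLoopA on the suffix, with arr[k] as previous token
theorem pvFold_eq_loop (arr : List (List Char)) :
    ∀ (m k : Nat), arr.length - (k + 1) = m → ∀ (hk : k < arr.length) (st : List Char × Bool),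
    (PySem.List.pyRange ((k : Int) + 1) (arr.length : Int)).foldl
      (fun (st : List Char × Bool) i =>
        (if st.2 then st.1 ++ PySem.List.pyGetD arr i [] ++ ['/'] else st.1,
         if PySem.List.pyGetD arr (i - 1) [] = "area".toList then true else st.2)) st
      = pvLoopA (arr.drop (k + 1)) arr[k] st := by
  intro m
  induction m with
  | zero =>
    intro k hm hk st
    have hlen : arr.length = k + 1 := by omega
    rw [PySem.List.pyRange_one_eq_nil (by omega)]
    rw [List.drop_eq_nil_of_le (by omega)]
    simp [pvLoopA]
  | succ m ih =>
    intro k hm hk st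
    have hk1 : k + 1 < arr.length := by omega
    rw [PySem.List.pyRange_one_cons (by exact_mod_cast by omega)]
    rw [List.foldl_cons]
    have e1 : PySem.List.pyGetD arr ((k : Int) + 1) [] = arr[k + 1] := by
      rw [show ((k : Int) + 1) = ((k + 1 : Nat) : Int) by push_cast; ring]
      rw [PySem.List.pyGetD_eq_getElem arr [] (by positivity) (by exact_mod_cast hk1)]
      simp
    have e2 : PySem.List.pyGetD arr ((k : Int) + 1 - 1) [] = arr[k] := by
      rw [show ((k : Int) + 1 - 1) = ((k : Nat) : Int) by ring]
      rw [PySem.List.pyGetD_eq_getElem arr [] (by positivity) (by exact_mod_cast hk)]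
      simp
    rw [show ((k : Int) + 1 + 1) = ((k + 1 : Nat) : Int) + 1 by push_cast; ring]
    rw [ih (k + 1) (by omega) hk1 _]
    rw [List.drop_eq_getElem_cons hk1]
    simp only [pvLoopA, e1, e2]

theorem pvFold_eq_loop0 (arr : List (List Char)) (h0 : 0 < arr.length) (st : List Char × Bool) :
    (PySem.List.pyRange 1 (arr.length : Int)).foldl
      (fun (st : List Char × Bool) i =>
        (if st.2 then st.1 ++ PySem.List.pyGetD arr i [] ++ ['/'] else st.1,
         if PySem.List.pyGetD arr (i - 1) [] = "area".toList then true else st.2)) st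
      = pvLoopA (arr.drop 1) arr[0] st := by
  have := pvFold_eq_loop arr (arr.length - 1) 0 rfl h0 st
  simpa using this

-- non-empty join, with a trailing slash appended, is pvFlat
theorem pvFlat_eq_join (x : List Char) (xs : List (List Char)) :
    pvFlat (x :: xs) = PySem.Chars.join ['/'] (x :: xs) ++ ['/'] := by
  induction xs generalizing x with
  | nil => simp [pvFlat, PySem.Chars.join_singleton]
  | cons y ys ih =>
    rw [PySem.Chars.join_cons_cons]
    have : pvFlat (x :: y :: ys) = x ++ ['/'] ++ pvFlat (y :: ys) := by
      simp [pvFlat]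
    rw [this, ih y]
    simp [List.append_assoc]

theorem pv_drop_slice (arr : List (List Char)) (i : Nat) :
    PySem.List.slice arr (some ((i : Int) + 2)) none = arr.drop (i + 2) := by
  rw [show ((i : Int) + 2) = ((i + 2 : Nat) : Int) by push_cast; ring]
  exact PySem.List.slice_from_natCast arr (i + 2)

-- ===== VERDICT (by name: the statement is the Claim_ definition above) =====
theorem get_interest_name_spec : Claim_equal_get_interest_name := by
  intro interest _
  unfold Spec_get_interest_name get_interest_name get_interest_name_alt
  cases harr : PySem.Chars.splitOn interest.toList ['/'] with
  | nil =>
    simp [PySem.List.pyRange_one_eq_nil, PySem.List.index?]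
  | cons h t =>
    simp only []
    have hlen : (h :: t).length = t.length + 1 := by simp
    rw [pvFold_eq_loop0 (h :: t) (by simp) ([], false)]
    simp only [List.drop_succ_cons, List.drop_zero, List.getElem_cons_zero]
    cases hix : PySem.List.index? (h :: t) "area".toList with
    | none =>
      have := pvLoopA_false t h
      rw [hix] at this
      simp only at this
      rw [if_neg (by simp [this])]
    | some i =>
      have hname := pvLoopA_false t h
      rw [hix] at hname
      simp only at hname
      dsimp only
      rw [pv_drop_slice (h :: t) i, List.drop_succ_cons]
      cases hdrop : t.drop (i + 1) with
      | nil =>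
        rw [hdrop] at hname
        rw [if_neg (by simp [hname, pvFlat]), if_pos rfl]
      | cons x xs =>
        rw [hdrop] at hname
        rw [hname, pvFlat_eq_join]
        rw [if_pos (by simp)]
        rw [if_neg (by simp)]
        rw [PySem.List.slice_to_neg_one, List.dropLast_concat]
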